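-- pv_equiv track=rewrite | github.com/mukhlisagithub/Telegram-Bot | Month-3/Lesson-8/String.py | reorderString
-- ===== SOURCE A (Python) =====
-- def reorderString(s):
--     result = ""
--     s = list(s)
--
--     while s:
--         smallest = min(s)
--         result += smallest
--         s.remove(smallest)
--
--         for char in s:
--             if char > result[-1]:
--                 result += char
--                 s.remove(char)
--                 break
--
--         for char in reversed(s):
--             if char < result[-1]:
--                 result += char
--                 s.remove(char)
--                 break
--     return result
-- ===== SOURCE B (Python) =====
-- def reorderString(s):
--     # Bucket the positions of every character once. A character is consumed by
--     # advancing its bucket pointer, so each bucket's remaining occurrences are a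
--     # suffix of its position list; in particular the rightmost remaining
--     # occurrence of a character is just its (fixed) last occurrence in s.
--     positions = {}
--     for i, ch in enumerate(s):
--         positions.setdefault(ch, []).append(i)
--     alphabet = sorted(positions)
--     taken = {c: 0 for c in alphabet}
--     last_at = {c: positions[c][-1] for c in alphabet}
--     out = []
--     remaining = len(s)
--     while remaining:
--         # smallest remaining character
--         cur = next(c for c in alphabet if taken[c] < len(positions[c]))
--         out.append(cur); taken[cur] += 1; remaining -= 1
--         # remaining character > cur whose next occurrence is leftmost
--         best = None
--         for c in alphabet:
--             if c > cur and taken[c] < len(positions[c]):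
--                 if best is None or positions[c][taken[c]] < positions[best][taken[best]]:
--                     best = c
--         if best is not None:
--             out.append(best); taken[best] += 1; remaining -= 1
--             cur = best
--         # remaining character < cur whose last occurrence in s is rightmost
--         best = None
--         for c in alphabet:
--             if c < cur and taken[c] < len(positions[c]):
--                 if best is None or last_at[c] > last_at[best]:
--                     best = c
--         if best is not None:
--             out.append(best); taken[best] += 1; remaining -= 1
--     return "".join(out)
-- ===== Notes on version B (the rewrite author's own statement) =====
-- stated objective: faster
-- what changed: A repeatedly scans and list.remove()s over the live character list (min, first-greater, last-smaller each rescan it); B buckets the positions of each character once, consumes occurrences by advancing a per-character pointer, and serves the three queries from the sorted alphabet: min = first nonempty bucket, leftmost-greater = argmin of bucket heads, rightmost-smaller = argmax of the precomputed last-occurrence indices.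
import Mathlib
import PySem

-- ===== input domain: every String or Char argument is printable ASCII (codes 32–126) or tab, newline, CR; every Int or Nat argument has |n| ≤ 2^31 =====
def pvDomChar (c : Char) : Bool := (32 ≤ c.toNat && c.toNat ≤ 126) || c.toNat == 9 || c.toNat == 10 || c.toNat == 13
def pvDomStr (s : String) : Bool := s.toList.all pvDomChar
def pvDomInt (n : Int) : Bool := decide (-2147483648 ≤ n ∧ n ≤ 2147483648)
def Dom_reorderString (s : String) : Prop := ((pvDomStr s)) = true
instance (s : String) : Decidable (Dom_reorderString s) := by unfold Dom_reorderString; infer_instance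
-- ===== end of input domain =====

-- B replaces A's scan-and-remove passes over the character list by per-character position
-- buckets consumed by a moving pointer (objective: faster).

-- ===== PORT A =====
-- A's while loop, ported with fuel = len(s); each pass removes at least one char, so the
-- fuel is never exhausted while s is nonempty.
def reorderStringLoopA (fuel : Nat) (s : List Char) (result : List Char) : List Char :=
  match fuel with
  | 0 => result
  | fuel + 1 =>
    if s = [] then result
    else
      match PySem.List.min? s (fun c => c) with
      | none => result   -- unreachable: s ≠ []
      | some smallest =>
        let result1 := result ++ [smallest]
        let s1 := (PySem.List.remove? s smallest).getD s
        -- for char in s: if char > result[-1]: append, remove, break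
        let step2 : List Char × List Char :=
          match s1.find? (fun char => decide (result1.getLastD ' ' < char)) with
          | some char => (result1 ++ [char], (PySem.List.remove? s1 char).getD s1)
          | none => (result1, s1)
        -- for char in reversed(s): if char < result[-1]: append, remove, break
        let step3 : List Char × List Char :=
          match step2.2.reverse.find? (fun char => decide (char < step2.1.getLastD ' ')) with
          | some char => (step2.1 ++ [char], (PySem.List.remove? step2.2 char).getD step2.2)
          | none => (step2.1, step2.2)
        reorderStringLoopA fuel step3.2 step3.1

def reorderString (s : String) : String :=
  String.ofList (reorderStringLoopA s.toList.length s.toList [])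

-- ===== PORT B =====
-- Source B keeps, per character c, the fixed list positions[c], a pointer taken[c] and the
-- fixed last_at[c]; here (positions[c], taken[c]) is represented by the remaining suffix
-- of the position list (taken[c] += 1 is List.tail, positions[c][taken[c]] is head?,
-- taken[c] < len(positions[c]) is nonemptiness), and last_at[c] is the third component.
-- Source B's one-pass build of each position bucket = filter of the enumeration.
def reorderStringBuckets (cs : List Char) : List (Char × List Int × Int) :=
  let vals := PySem.List.sorted (PySem.Set.ofList cs) (fun c => c) false
  vals.map (fun c =>
    let ps := ((PySem.List.enumerate cs).filter (fun q => q.2 == c)).map (·.1)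
    (c, ps, ps.getLastD 0))

-- next(c for c in alphabet if taken[c] < len(positions[c]))
def bkFirst? (bk : List (Char × List Int × Int)) : Option Char :=
  (bk.find? (fun b => !b.2.1.isEmpty)).map (·.1)

-- taken[c] += 1
def bkPop (bk : List (Char × List Int × Int)) (c : Char) : List (Char × List Int × Int) :=
  bk.map (fun b => if b.1 == c then (b.1, b.2.1.tail, b.2.2) else b)

-- the body of Source B's first for-loop (update of best, tracking its head position)
def bkPickGtStep (cur : Char) (acc : Option (Char × Int)) (b : Char × List Int × Int) : Option (Char × Int) :=
  if cur < b.1 then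
    match b.2.1.head? with
    | none => acc
    | some p =>
      match acc with
      | none => some (b.1, p)
      | some pr => if p < pr.2 then some (b.1, p) else acc
  else acc

-- argmin over next-occurrence positions of the remaining characters > cur
def bkPickGt (bk : List (Char × List Int × Int)) (cur : Char) : Option (Char × Int) :=
  bk.foldl (bkPickGtStep cur) none

-- the body of Source B's second for-loop (update of best, tracking its last_at)
def bkPickLtStep (cur : Char) (acc : Option (Char × Int)) (b : Char × List Int × Int) : Option (Char × Int) :=
  if b.1 < cur ∧ b.2.1 ≠ [] then
    match acc with
    | none => some (b.1, b.2.2)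
    | some pr => if pr.2 < b.2.2 then some (b.1, b.2.2) else acc
  else acc

-- argmax over last_at of the remaining characters < cur
def bkPickLt (bk : List (Char × List Int × Int)) (cur : Char) : Option (Char × Int) :=
  bk.foldl (bkPickLtStep cur) none

-- while remaining: ported as "while some bucket is nonempty", with fuel = len(s)
-- (each pass pops at least one position, so the fuel is never exhausted early).
def reorderStringLoopB (fuel : Nat) (bk : List (Char × List Int × Int)) (out : List Char) : List Char :=
  match fuel with
  | 0 => out
  | fuel + 1 =>
    match bkFirst? bk with
    | none => out
    | some cur =>
      let bk1 := bkPop bk cur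
      let out1 := out ++ [cur]
      let step2 : List Char × List (Char × List Int × Int) × Char :=
        match bkPickGt bk1 cur with
        | some pr => (out1 ++ [pr.1], bkPop bk1 pr.1, pr.1)
        | none => (out1, bk1, cur)
      let step3 : List Char × List (Char × List Int × Int) :=
        match bkPickLt step2.2.1 step2.2.2 with
        | some pr => (step2.1 ++ [pr.1], bkPop step2.2.1 pr.1)
        | none => (step2.1, step2.2.1)
      reorderStringLoopB fuel step3.2 step3.1

def reorderString_alt (s : String) : String :=
  String.ofList (reorderStringLoopB s.toList.length (reorderStringBuckets s.toList) [])

-- ===== PRECONDITION & SPEC =====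
def Spec_reorderString (s : String) (out : String) : Prop := out = reorderString_alt s
instance (s : String) (out : String) : Decidable (Spec_reorderString s out) := by unfold Spec_reorderString; infer_instance

-- ===== CLAIM (what is proved, stated in full; the proofs are below) =====
def Claim_equal_reorderString : Prop := ∀ (s : String), Dom_reorderString s → Spec_reorderString s (reorderString s)

-- ===== LEMMAS AND PROOFS =====

-- The coupling invariant: P is the list of live (position, char) pairs in position order;
-- A's list is P.map (·.2); each bucket holds exactly the live positions of its char, and
-- its stored last_at is the last live position whenever the bucket is nonempty.
structure RelRS (P : List (Int × Char)) (bk : List (Char × List Int × Int)) : Prop where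
  hpos : P.Pairwise (fun a b => a.1 < b.1)
  hkeys : bk.Pairwise (fun a b => a.1 < b.1)
  hspec : ∀ b ∈ bk, b.2.1 = (P.filter (fun q => q.2 == b.1)).map (·.1)
  hlast : ∀ b ∈ bk, b.2.1 ≠ [] → b.2.1.getLast? = some b.2.2
  hcov : ∀ q ∈ P, ∃ b ∈ bk, b.1 = q.2

theorem filter_eraseP_self {α : Type} (p : α → Bool) (l : List α) :
    (l.eraseP p).filter p = (l.filter p).tail := by
  induction l with
  | nil => rfl
  | cons x l ih =>
    by_cases h : p x = true
    · simp [List.eraseP_cons, List.filter_cons, h]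
    · simp only [Bool.not_eq_true] at h
      simp [List.eraseP_cons, List.filter_cons, h, ih]

theorem filter_eraseP_of_imp {α : Type} (p q : α → Bool) (l : List α)
    (h : ∀ x, q x = true → p x = false) :
    (l.eraseP q).filter p = l.filter p := by
  induction l with
  | nil => rfl
  | cons x l ih =>
    by_cases hq : q x = true
    · simp [List.eraseP_cons, hq, List.filter_cons, h x hq]
    · simp only [Bool.not_eq_true] at hq
      simp [List.eraseP_cons, hq, List.filter_cons, ih]

theorem map_snd_eraseP (P : List (Int × Char)) (c : Char) :
    (P.eraseP (fun q => q.2 == c)).map (·.2) = (P.map (·.2)).erase c := by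
  induction P with
  | nil => rfl
  | cons q P ih =>
    by_cases h : q.2 = c
    · simp [List.eraseP_cons, List.erase_cons, h]
    · simp [List.eraseP_cons, List.erase_cons, h, ih]

theorem getLast?_tail_of_ne {α : Type} (l : List α) (h : l.tail ≠ []) :
    l.tail.getLast? = l.getLast? := by
  cases l with
  | nil => rfl
  | cons x l =>
    cases l with
    | nil => simp at h
    | cons y t => simp [List.getLast?_cons_cons]

theorem relRS_pop (P : List (Int × Char)) (bk : List (Char × List Int × Int)) (c : Char)
    (h : RelRS P bk) : RelRS (P.eraseP (fun q => q.2 == c)) (bkPop bk c) := by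
  constructor
  · exact h.hpos.sublist List.eraseP_sublist
  · rw [bkPop, List.pairwise_map]
    refine h.hkeys.imp ?_
    intro a b hab
    have ha : (if a.1 == c then (a.1, a.2.1.tail, a.2.2) else a).1 = a.1 := by split <;> rfl
    have hb : (if b.1 == c then (b.1, b.2.1.tail, b.2.2) else b).1 = b.1 := by split <;> rfl
    rw [ha, hb]
    exact hab
  · intro b hb
    rw [bkPop, List.mem_map] at hb
    obtain ⟨b₀, hb₀, rfl⟩ := hb
    have hs := h.hspec b₀ hb₀
    by_cases hc : b₀.1 = c
    · simp only [hc, beq_self_eq_true, if_pos]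
      rw [hs, ← List.map_tail, ← filter_eraseP_self, hc]
    · rw [if_neg (by simp [hc])]
      rw [hs, filter_eraseP_of_imp]
      intro x hx
      simp only [beq_iff_eq] at hx
      simp only [beq_eq_false_iff_ne, ne_eq, hx]
      exact fun h' => hc h'.symm
  · intro b hb
    rw [bkPop, List.mem_map] at hb
    obtain ⟨b₀, hb₀, rfl⟩ := hb
    by_cases hc : b₀.1 = c
    · simp only [hc, beq_self_eq_true, if_pos]
      intro hne
      rw [getLast?_tail_of_ne _ hne]
      exact h.hlast b₀ hb₀ (by intro h'; rw [h'] at hne; exact hne rfl)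
    · rw [if_neg (by simp [hc])]
      exact h.hlast b₀ hb₀
  · intro q hq
    have hqP : q ∈ P := List.eraseP_sublist.mem hq
    obtain ⟨b, hb, hb1⟩ := h.hcov q hqP
    refine ⟨if b.1 == c then (b.1, b.2.1.tail, b.2.2) else b, ?_, ?_⟩
    · rw [bkPop]; exact List.mem_map_of_mem hb
    · split <;> simpa using hb1

theorem bucket_elem_mem (P : List (Int × Char)) (bk : List (Char × List Int × Int))
    (h : RelRS P bk) (b : Char × List Int × Int) (hb : b ∈ bk) (p : Int) (hp : p ∈ b.2.1) :
    (p, b.1) ∈ P := by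
  rw [h.hspec b hb, List.mem_map] at hp
  obtain ⟨q, hq, rfl⟩ := hp
  have := List.of_mem_filter hq
  simp only [beq_iff_eq] at this
  have hqP := List.mem_of_mem_filter hq
  have : q = (q.1, b.1) := by rw [← this]
  rwa [← this]

theorem bucket_ne_nil_iff (P : List (Int × Char)) (bk : List (Char × List Int × Int))
    (h : RelRS P bk) (b : Char × List Int × Int) (hb : b ∈ bk) :
    b.2.1 ≠ [] ↔ b.1 ∈ P.map (·.2) := by
  rw [h.hspec b hb]
  simp only [ne_eq, List.map_eq_nil_iff, List.filter_eq_nil_iff, List.mem_map]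
  push_neg
  constructor
  · rintro ⟨q, hq, hqc⟩
    exact ⟨q, hq, by simpa using hqc⟩
  · rintro ⟨q, hq, hqc⟩
    exact ⟨q, hq, by simpa using hqc⟩

theorem bkFirst_eq_min (P : List (Int × Char)) (bk : List (Char × List Int × Int))
    (h : RelRS P bk) :
    bkFirst? bk = PySem.List.min? (P.map (·.2)) (fun c => c) := by
  cases hm : PySem.List.min? (P.map (·.2)) (fun c => c) with
  | none =>
    have hP : P.map (·.2) = [] := (PySem.List.min?_eq_none_iff _ _).mp hm
    have hP' : P = [] := by simpa using hP
    subst hP'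
    rw [bkFirst?, List.find?_eq_none.mpr]
    · rfl
    · intro b hb
      have := h.hspec b hb
      simp only [List.filter_nil, List.map_nil] at this
      simp [this]
  | some m =>
    have hmem : m ∈ P.map (·.2) := PySem.List.min?_mem hm
    have hmin : ∀ y ∈ P.map (·.2), m ≤ y := PySem.List.min?_isMin hm
    obtain ⟨q, hq, hq2⟩ := List.mem_map.mp hmem
    obtain ⟨b₀, hb₀, hb₀1⟩ := h.hcov q hq
    have hb₀ne : b₀.2.1 ≠ [] := by
      rw [bucket_ne_nil_iff P bk h b₀ hb₀, hb₀1, hq2]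
      exact hmem
    cases hf : bk.find? (fun b => !b.2.1.isEmpty) with
    | none =>
      exfalso
      have := List.find?_eq_none.mp hf b₀ hb₀
      simp only [Bool.not_eq_true'] at this
      exact hb₀ne (List.isEmpty_iff.mp (by simpa using this))
    | some b =>
      have hbmem := List.mem_of_find?_eq_some hf
      have hbp : b.2.1 ≠ [] := by
        have := List.find?_some hf
        simpa [List.isEmpty_iff] using this
      have hb1s : b.1 ∈ P.map (·.2) := (bucket_ne_nil_iff P bk h b hbmem).mp hbp
      have h1 : m ≤ b.1 := hmin _ hb1s
      have h2 : b.1 ≤ m := by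
        obtain ⟨_, as, bs, hdec, hfail⟩ := List.find?_eq_some_iff_append.mp hf
        have hb₀nas : b₀ ∉ as := by
          intro hmem'
          have := hfail b₀ hmem'
          simp only [Bool.not_not, Bool.not_eq_true'] at this
          exact hb₀ne (List.isEmpty_iff.mp (by simpa using this))
        have : b₀ = b ∨ b₀ ∈ bs := by
          have := hdec ▸ hb₀
          rcases List.mem_append.mp this with h' | h'
          · exact absurd h' hb₀nas
          · rcases List.mem_cons.mp h' with h'' | h''
            · exact Or.inl h''
            · exact Or.inr h''
        rcases this with rfl | hbs
        · rw [hb₀1, hq2]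
        · have hkeys := h.hkeys
          rw [hdec, List.pairwise_append] at hkeys
          have := (List.pairwise_cons.mp hkeys.2.1).1 b₀ hbs
          rw [hb₀1, hq2] at this
          exact le_of_lt this
      rw [bkFirst?, hf]
      simp [le_antisymm h1 h2]

theorem pickGt_stay (t : Char) (c₀ : Char) (p₀ : Int) (l : List (Char × List Int × Int))
    (h : ∀ b ∈ l, t < b.1 → ∀ p, b.2.1.head? = some p → p₀ < p) :
    l.foldl (bkPickGtStep t) (some (c₀, p₀)) = some (c₀, p₀) := by
  induction l with
  | nil => rfl
  | cons b l ih =>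
    rw [List.foldl_cons]
    have hstep : bkPickGtStep t (some (c₀, p₀)) b = some (c₀, p₀) := by
      rw [bkPickGtStep]
      split
      · cases hh : b.2.1.head? with
        | none => rfl
        | some p =>
          have := h b (List.mem_cons_self) (by assumption) p hh
          simp [not_lt_of_gt this]
      · rfl
    rw [hstep]
    exact ih (fun b' hb' => h b' (List.mem_cons_of_mem _ hb'))

theorem pickGt_worse (t : Char) (p₀ : Int) (l : List (Char × List Int × Int))
    (h : ∀ b ∈ l, t < b.1 → ∀ p, b.2.1.head? = some p → p₀ < p) :
    ∀ acc, (acc = none ∨ ∃ c p, acc = some (c, p) ∧ p₀ < p) →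
      (l.foldl (bkPickGtStep t) acc = none ∨
        ∃ c p, l.foldl (bkPickGtStep t) acc = some (c, p) ∧ p₀ < p) := by
  induction l with
  | nil => intro acc hacc; simpa using hacc
  | cons b l ih =>
    intro acc hacc
    rw [List.foldl_cons]
    refine ih (fun b' hb' => h b' (List.mem_cons_of_mem _ hb')) _ ?_
    rw [bkPickGtStep]
    split
    · cases hh : b.2.1.head? with
      | none => exact hacc
      | some p =>
        have hp := h b List.mem_cons_self (by assumption) p hh
        rcases hacc with rfl | ⟨c, p', rfl, hp'⟩
        · exact Or.inr ⟨b.1, p, rfl, hp⟩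
        · by_cases hlt : p < p'
          · simp only [if_pos hlt]
            exact Or.inr ⟨b.1, p, rfl, hp⟩
          · simp only [if_neg hlt]
            exact Or.inr ⟨c, p', rfl, hp'⟩
    · exact hacc

theorem pickGt_main (t c₀ : Char) (p₀ : Int) (u v : List (Char × List Int × Int))
    (b₀ : Char × List Int × Int)
    (hb1 : b₀.1 = c₀) (ht : t < c₀) (hh : b₀.2.1.head? = some p₀)
    (hu : ∀ b ∈ u, t < b.1 → ∀ p, b.2.1.head? = some p → p₀ < p)
    (hv : ∀ b ∈ v, t < b.1 → ∀ p, b.2.1.head? = some p → p₀ < p) :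
    bkPickGt (u ++ b₀ :: v) t = some (c₀, p₀) := by
  rw [bkPickGt, List.foldl_append, List.foldl_cons]
  have hacc := pickGt_worse t p₀ u hu none (Or.inl rfl)
  have hstep : bkPickGtStep t (u.foldl (bkPickGtStep t) none) b₀ = some (c₀, p₀) := by
    simp only [bkPickGtStep, if_pos (hb1 ▸ ht), hh]
    rcases hacc with he | ⟨c, p, he, hp⟩
    · simp [he, hb1]
    · simp [he, hp, hb1]
  rw [hstep]
  exact pickGt_stay t c₀ p₀ v hv

theorem pickGt_none (t : Char) (l : List (Char × List Int × Int))
    (h : ∀ b ∈ l, t < b.1 → b.2.1.head? = none) :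
    bkPickGt l t = none := by
  rw [bkPickGt]
  induction l with
  | nil => rfl
  | cons b l ih =>
    rw [List.foldl_cons]
    have hstep : bkPickGtStep t none b = none := by
      rw [bkPickGtStep]
      split
      · rw [h b List.mem_cons_self (by assumption)]
      · rfl
    rw [hstep]
    exact ih (fun b' hb' => h b' (List.mem_cons_of_mem _ hb'))

theorem pickLt_stay (t : Char) (c₀ : Char) (p₀ : Int) (l : List (Char × List Int × Int))
    (h : ∀ b ∈ l, b.1 < t → b.2.1 ≠ [] → b.2.2 < p₀) :
    l.foldl (bkPickLtStep t) (some (c₀, p₀)) = some (c₀, p₀) := by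
  induction l with
  | nil => rfl
  | cons b l ih =>
    rw [List.foldl_cons]
    have hstep : bkPickLtStep t (some (c₀, p₀)) b = some (c₀, p₀) := by
      rw [bkPickLtStep]
      split
      · rename_i hcond
        have := h b List.mem_cons_self hcond.1 hcond.2
        simp [not_lt_of_gt this]
      · rfl
    rw [hstep]
    exact ih (fun b' hb' => h b' (List.mem_cons_of_mem _ hb'))

theorem pickLt_worse (t : Char) (p₀ : Int) (l : List (Char × List Int × Int))
    (h : ∀ b ∈ l, b.1 < t → b.2.1 ≠ [] → b.2.2 < p₀) :
    ∀ acc, (acc = none ∨ ∃ c p, acc = some (c, p) ∧ p < p₀) →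
      (l.foldl (bkPickLtStep t) acc = none ∨
        ∃ c p, l.foldl (bkPickLtStep t) acc = some (c, p) ∧ p < p₀) := by
  induction l with
  | nil => intro acc hacc; simpa using hacc
  | cons b l ih =>
    intro acc hacc
    rw [List.foldl_cons]
    refine ih (fun b' hb' => h b' (List.mem_cons_of_mem _ hb')) _ ?_
    rcases hacc with rfl | ⟨c, p', rfl, hp'⟩
    · rw [bkPickLtStep]
      split
      · rename_i hcond
        exact Or.inr ⟨b.1, b.2.2, rfl, h b List.mem_cons_self hcond.1 hcond.2⟩
      · exact Or.inl rfl
    · rw [bkPickLtStep]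
      split
      · rename_i hcond
        have hp := h b List.mem_cons_self hcond.1 hcond.2
        by_cases hlt : p' < b.2.2
        · simp only [if_pos hlt]
          exact Or.inr ⟨b.1, b.2.2, rfl, hp⟩
        · simp only [if_neg hlt]
          exact Or.inr ⟨c, p', rfl, hp'⟩
      · exact Or.inr ⟨c, p', rfl, hp'⟩

theorem pickLt_main (t c₀ : Char) (p₀ : Int) (u v : List (Char × List Int × Int))
    (b₀ : Char × List Int × Int)
    (hb1 : b₀.1 = c₀) (ht : c₀ < t) (hne : b₀.2.1 ≠ []) (hl : b₀.2.2 = p₀)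
    (hu : ∀ b ∈ u, b.1 < t → b.2.1 ≠ [] → b.2.2 < p₀)
    (hv : ∀ b ∈ v, b.1 < t → b.2.1 ≠ [] → b.2.2 < p₀) :
    bkPickLt (u ++ b₀ :: v) t = some (c₀, p₀) := by
  rw [bkPickLt, List.foldl_append, List.foldl_cons]
  have hacc := pickLt_worse t p₀ u hu none (Or.inl rfl)
  have hstep : bkPickLtStep t (u.foldl (bkPickLtStep t) none) b₀ = some (c₀, p₀) := by
    simp only [bkPickLtStep, if_pos (And.intro (hb1 ▸ ht) hne)]
    rcases hacc with he | ⟨c, p, he, hp⟩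
    · simp [he, hb1, hl]
    · rw [hl] at *
      simp [he, hp, hb1]
  rw [hstep]
  exact pickLt_stay t c₀ p₀ v hv

theorem pickLt_none (t : Char) (l : List (Char × List Int × Int))
    (h : ∀ b ∈ l, b.1 < t → b.2.1 = []) :
    bkPickLt l t = none := by
  rw [bkPickLt]
  induction l with
  | nil => rfl
  | cons b l ih =>
    rw [List.foldl_cons]
    have hstep : bkPickLtStep t none b = none := by
      rw [bkPickLtStep]
      split
      · rename_i hcond
        exact absurd (h b List.mem_cons_self hcond.1) hcond.2
      · rfl
    rw [hstep]
    exact ih (fun b' hb' => h b' (List.mem_cons_of_mem _ hb'))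

theorem pickGt_eq (P : List (Int × Char)) (bk : List (Char × List Int × Int)) (t : Char)
    (hrel : RelRS P bk) :
    bkPickGt bk t = (P.find? (fun q => decide (t < q.2))).map (fun q => (q.2, q.1)) := by
  cases hf : P.find? (fun q => decide (t < q.2)) with
  | none =>
    have hall := List.find?_eq_none.mp hf
    rw [Option.map_none]
    apply pickGt_none
    intro b hb htb
    cases hh : b.2.1.head? with
    | none => rfl
    | some p =>
      exfalso
      have hmem : (p, b.1) ∈ P :=
        bucket_elem_mem P bk hrel b hb p (List.mem_of_mem_head? hh)
      have := hall _ hmem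
      simp only [decide_eq_true_eq] at this
      exact this htb
  | some e =>
    obtain ⟨hpe, l₁, l₂, hPdec, hfail⟩ := List.find?_eq_some_iff_append.mp hf
    simp only [decide_eq_true_eq] at hpe
    have hfail' : ∀ x ∈ l₁, ¬ t < x.2 := by
      intro x hx
      have := hfail x hx
      simpa using this
    have heP : e ∈ P := by rw [hPdec]; exact List.mem_append_right _ List.mem_cons_self
    obtain ⟨b₀, hb₀, hb₀1⟩ := hrel.hcov e heP
    have hb₀2 : b₀.2.1 = e.1 :: (l₂.filter (fun q => q.2 == b₀.1)).map (·.1) := by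
      rw [hrel.hspec b₀ hb₀, hPdec, List.filter_append, List.filter_cons]
      have h1 : l₁.filter (fun q => q.2 == b₀.1) = [] := by
        rw [List.filter_eq_nil_iff]
        intro x hx
        simp only [beq_iff_eq, hb₀1]
        intro hxe
        exact hfail' x hx (hxe ▸ hpe)
      rw [h1]
      simp [hb₀1]
    have hhead : b₀.2.1.head? = some e.1 := by rw [hb₀2]; rfl
    obtain ⟨u, v, hbk⟩ := List.append_of_mem hb₀
    have hkeys := hrel.hkeys
    rw [hbk, List.pairwise_append] at hkeys
    have key : ∀ b ∈ bk, t < b.1 → ∀ p, b.2.1.head? = some p → b.1 ≠ b₀.1 → e.1 < p := by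
      intro b hb htb p hp hne
      have hmem : (p, b.1) ∈ P :=
        bucket_elem_mem P bk hrel b hb p (List.mem_of_mem_head? hp)
      rw [hPdec] at hmem
      rcases List.mem_append.mp hmem with h1 | h2
      · exact absurd htb (hfail' _ h1)
      · rcases List.mem_cons.mp h2 with h3 | h4
        · exfalso
          apply hne
          rw [hb₀1, ← h3]
        · have hpos := hrel.hpos
          rw [hPdec, List.pairwise_append] at hpos
          exact (List.pairwise_cons.mp hpos.2.1).1 _ h4
    rw [hbk, Option.map_some]
    apply pickGt_main t e.2 e.1 u v b₀ hb₀1 hpe hhead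
    · intro b hb htb p hp
      have hne : b.1 ≠ b₀.1 := ne_of_lt (hkeys.2.2 b hb b₀ List.mem_cons_self)
      exact key b (hbk ▸ List.mem_append_left _ hb) htb p hp hne
    · intro b hb htb p hp
      have hne : b.1 ≠ b₀.1 :=
        (ne_of_lt ((List.pairwise_cons.mp hkeys.2.1).1 b hb)).symm
      exact key b (hbk ▸ List.mem_append_right _ (List.mem_cons_of_mem _ hb)) htb p hp hne

theorem pickLt_eq (P : List (Int × Char)) (bk : List (Char × List Int × Int)) (t : Char)
    (hrel : RelRS P bk) :
    bkPickLt bk t = (P.reverse.find? (fun q => decide (q.2 < t))).map (fun q => (q.2, q.1)) := by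
  cases hf : P.reverse.find? (fun q => decide (q.2 < t)) with
  | none =>
    have hall := List.find?_eq_none.mp hf
    rw [Option.map_none]
    apply pickLt_none
    intro b hb htb
    by_contra hne
    obtain ⟨p, hp⟩ : ∃ p, b.2.1.getLast? = some p :=
      Option.ne_none_iff_exists'.mp (fun h' => hne (List.getLast?_eq_none_iff.mp h'))
    have hmem : (p, b.1) ∈ P :=
      bucket_elem_mem P bk hrel b hb p (List.mem_of_getLast? hp)
    have := hall _ (List.mem_reverse.mpr hmem)
    simp only [decide_eq_true_eq] at this
    exact this htb
  | some f =>
    obtain ⟨hpf, l₁, l₂, hPdec, hfail⟩ := List.find?_eq_some_iff_append.mp hf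
    simp only [decide_eq_true_eq] at hpf
    have hfail' : ∀ x ∈ l₁, ¬ x.2 < t := by
      intro x hx
      have := hfail x hx
      simpa using this
    have hP2 : P = (l₂.reverse ++ [f]) ++ l₁.reverse := by
      have : P.reverse.reverse = P := List.reverse_reverse P
      rw [← this, hPdec]
      simp [List.reverse_append]
    have hfP : f ∈ P := by
      rw [hP2]
      exact List.mem_append_left _ (List.mem_append_right _ List.mem_cons_self)
    obtain ⟨b₀, hb₀, hb₀1⟩ := hrel.hcov f hfP
    have hb₀2 : b₀.2.1 = (l₂.reverse.filter (fun q => q.2 == b₀.1)).map (·.1) ++ [f.1] := by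
      rw [hrel.hspec b₀ hb₀, hP2, List.filter_append, List.filter_append]
      have h1 : l₁.reverse.filter (fun q => q.2 == b₀.1) = [] := by
        rw [List.filter_eq_nil_iff]
        intro x hx
        simp only [beq_iff_eq, hb₀1]
        intro hxf
        exact hfail' x (List.mem_reverse.mp hx) (hxf ▸ hpf)
      rw [h1]
      simp [hb₀1]
    have hb₀ne : b₀.2.1 ≠ [] := by rw [hb₀2]; simp
    have hlastf : b₀.2.1.getLast? = some f.1 := by rw [hb₀2, List.getLast?_concat]
    have hb₀l : b₀.2.2 = f.1 := by
      have h1 := hrel.hlast b₀ hb₀ hb₀ne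
      rw [h1] at hlastf
      exact Option.some.inj hlastf
    obtain ⟨u, v, hbk⟩ := List.append_of_mem hb₀
    have hkeys := hrel.hkeys
    rw [hbk, List.pairwise_append] at hkeys
    have key : ∀ b ∈ bk, b.1 < t → b.2.1 ≠ [] → b.1 ≠ b₀.1 → b.2.2 < f.1 := by
      intro b hb htb hbne hne
      obtain ⟨p, hp⟩ : ∃ p, b.2.1.getLast? = some p :=
        Option.ne_none_iff_exists'.mp (fun h' => hbne (List.getLast?_eq_none_iff.mp h'))
      have hbl : b.2.2 = p := by
        have h1 := hrel.hlast b hb hbne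
        rw [h1] at hp
        exact Option.some.inj hp
      rw [hbl]
      have hmem : (p, b.1) ∈ P :=
        bucket_elem_mem P bk hrel b hb p (List.mem_of_getLast? hp)
      rw [hP2] at hmem
      rcases List.mem_append.mp hmem with h1 | h2
      · rcases List.mem_append.mp h1 with h3 | h4
        · have hpos := hrel.hpos
          rw [hP2, List.pairwise_append] at hpos
          have := hpos.1
          rw [List.pairwise_append] at this
          exact this.2.2 _ h3 f List.mem_cons_self
        · exfalso
          apply hne
          rw [hb₀1]
          rcases List.mem_cons.mp h4 with h5 | h5
          · rw [← h5]
          · simp at h5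
      · exact absurd htb (hfail' _ (List.mem_reverse.mp h2))
    rw [hbk, Option.map_some]
    apply pickLt_main t f.2 f.1 u v b₀ hb₀1 hpf hb₀ne hb₀l
    · intro b hb htb hbne
      have hne : b.1 ≠ b₀.1 := ne_of_lt (hkeys.2.2 b hb b₀ List.mem_cons_self)
      exact key b (hbk ▸ List.mem_append_left _ hb) htb hbne hne
    · intro b hb htb hbne
      have hne : b.1 ≠ b₀.1 :=
        (ne_of_lt ((List.pairwise_cons.mp hkeys.2.1).1 b hb)).symm
      exact key b (hbk ▸ List.mem_append_right _ (List.mem_cons_of_mem _ hb)) htb hbne hne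

theorem loopAB_eq (fuel : Nat) :
    ∀ (P : List (Int × Char)) (bk : List (Char × List Int × Int)) (res : List Char),
      RelRS P bk →
      reorderStringLoopA fuel (P.map (·.2)) res = reorderStringLoopB fuel bk res := by
  induction fuel with
  | zero => intro P bk res _; rfl
  | succ fuel ih =>
    intro P bk res hrel
    -- shared treatment of the third pass (same for both outcomes of the second pass)
    have step3 : ∀ (P2 : List (Int × Char)) (bk2 : List (Char × List Int × Int)) (t : Char)
        (res2 : List Char), RelRS P2 bk2 → res2.getLastD ' ' = t →
        reorderStringLoopA fuel
          ((match (P2.map (·.2)).reverse.find? (fun char => decide (char < res2.getLastD ' ')) with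
            | some char => (res2 ++ [char],
                (PySem.List.remove? (P2.map (·.2)) char).getD (P2.map (·.2)))
            | none => (res2, P2.map (·.2)) : List Char × List Char)).2
          ((match (P2.map (·.2)).reverse.find? (fun char => decide (char < res2.getLastD ' ')) with
            | some char => (res2 ++ [char],
                (PySem.List.remove? (P2.map (·.2)) char).getD (P2.map (·.2)))
            | none => (res2, P2.map (·.2)) : List Char × List Char)).1
        = reorderStringLoopB fuel
          ((match bkPickLt bk2 t with
            | some pr => (res2 ++ [pr.1], bkPop bk2 pr.1)
            | none => (res2, bk2) : List Char × List (Char × List Int × Int))).2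
          ((match bkPickLt bk2 t with
            | some pr => (res2 ++ [pr.1], bkPop bk2 pr.1)
            | none => (res2, bk2) : List Char × List (Char × List Int × Int))).1 := by
      intro P2 bk2 t res2 hrel2 hgl
      rw [hgl]
      have hpl := pickLt_eq P2 bk2 t hrel2
      have hrev : (P2.map (·.2)).reverse.find? (fun c => decide (c < t))
          = (P2.reverse.find? (fun q => decide (q.2 < t))).map (·.2) := by
        rw [← List.map_reverse, List.find?_map]
        rfl
      cases hf : P2.reverse.find? (fun q => decide (q.2 < t)) with
      | none =>
        rw [hrev, hf, hpl, hf]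
        exact ih P2 bk2 res2 hrel2
      | some f =>
        have hfP : f ∈ P2 := List.mem_reverse.mp (List.mem_of_find?_eq_some hf)
        have hfs : f.2 ∈ P2.map (·.2) := List.mem_map_of_mem hfP
        rw [hrev, hf, hpl, hf]
        simp only [Option.map_some]
        rw [PySem.List.remove?_eq_some_erase _ _ hfs, Option.getD_some, ← map_snd_eraseP]
        exact ih _ _ _ (relRS_pop P2 bk2 f.2 hrel2)
    have hfm := bkFirst_eq_min P bk hrel
    cases hm : PySem.List.min? (P.map (·.2)) (fun c => c) with
    | none =>
      have hP : P.map (·.2) = [] := (PySem.List.min?_eq_none_iff _ _).mp hm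
      rw [reorderStringLoopA, reorderStringLoopB, hfm, hm, if_pos hP]
    | some m =>
      have hmem : m ∈ P.map (·.2) := PySem.List.min?_mem hm
      have hne : P.map (·.2) ≠ [] := by intro h; rw [h] at hmem; cases hmem
      rw [reorderStringLoopA, reorderStringLoopB, hfm, hm, if_neg hne]
      dsimp only
      have hrel1 := relRS_pop P bk m hrel
      have hs1 : (PySem.List.remove? (P.map (·.2)) m).getD (P.map (·.2))
          = (P.eraseP (fun q => q.2 == m)).map (·.2) := by
        rw [PySem.List.remove?_eq_some_erase _ _ hmem, Option.getD_some, map_snd_eraseP]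
      rw [hs1]
      have hgl1 : (res ++ [m]).getLastD ' ' = m := List.getLastD_concat
      have hpg := pickGt_eq (P.eraseP (fun q => q.2 == m)) (bkPop bk m) m hrel1
      have hfind2 : ((P.eraseP (fun q => q.2 == m)).map (·.2)).find?
            (fun char => decide ((res ++ [m]).getLastD ' ' < char))
          = ((P.eraseP (fun q => q.2 == m)).find? (fun q => decide (m < q.2))).map (·.2) := by
        rw [hgl1, List.find?_map]
        rfl
      rw [hfind2, hpg]
      cases he : (P.eraseP (fun q => q.2 == m)).find? (fun q => decide (m < q.2)) with
      | none =>
        simp only [Option.map_none]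
        exact step3 _ _ m (res ++ [m]) hrel1 hgl1
      | some e =>
        have heP : e ∈ P.eraseP (fun q => q.2 == m) := List.mem_of_find?_eq_some he
        have hes : e.2 ∈ (P.eraseP (fun q => q.2 == m)).map (·.2) := List.mem_map_of_mem heP
        simp only [Option.map_some]
        rw [PySem.List.remove?_eq_some_erase _ _ hes, Option.getD_some, ← map_snd_eraseP]
        exact step3 _ _ e.2 ((res ++ [m]) ++ [e.2]) (relRS_pop _ _ e.2 hrel1)
          List.getLastD_concat

theorem relRS_init (cs : List Char) :
    RelRS (PySem.List.enumerate cs 0) (reorderStringBuckets cs) := by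
  constructor
  · exact PySem.List.pairwise_lt_enumerate cs 0
  · rw [reorderStringBuckets, List.pairwise_map]
    exact PySem.List.sorted_ofList_pairwise_lt cs
  · intro b hb
    rw [reorderStringBuckets] at hb
    obtain ⟨c, _, rfl⟩ := List.mem_map.mp hb
    rfl
  · intro b hb
    rw [reorderStringBuckets] at hb
    obtain ⟨c, _, rfl⟩ := List.mem_map.mp hb
    intro hne
    dsimp only at hne ⊢
    cases hg : (((PySem.List.enumerate cs).filter (fun q => q.2 == c)).map (·.1)).getLast? with
    | none => exact absurd (List.getLast?_eq_none_iff.mp hg) hne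
    | some p => simp [List.getLastD_eq_getLast?, hg]
  · intro q hq
    have hq2 : q.2 ∈ cs := by
      obtain ⟨k, hk, rfl⟩ := (PySem.List.mem_enumerate_iff cs 0 q).mp hq
      exact List.getElem_mem hk
    have hv : q.2 ∈ PySem.List.sorted (PySem.Set.ofList cs) (fun c => c) false := by
      rw [PySem.List.mem_sorted]
      exact (PySem.Set.mem_ofList cs q.2).mpr hq2
    refine ⟨(q.2, ((PySem.List.enumerate cs).filter (fun p => p.2 == q.2)).map (·.1),
      (((PySem.List.enumerate cs).filter (fun p => p.2 == q.2)).map (·.1)).getLastD 0), ?_, rfl⟩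
    rw [reorderStringBuckets]
    exact List.mem_map_of_mem hv

theorem loop_init (cs : List Char) :
    reorderStringLoopA cs.length cs [] = reorderStringLoopB cs.length (reorderStringBuckets cs) [] := by
  have h := loopAB_eq cs.length (PySem.List.enumerate cs 0) (reorderStringBuckets cs) []
    (relRS_init cs)
  rwa [PySem.List.map_snd_enumerate] at h

-- ===== VERDICT (by name: the statement is the Claim_ definition above) =====
theorem reorderString_spec : Claim_equal_reorderString := by
  intro s _
  unfold Spec_reorderString reorderString reorderString_alt
  exact congrArg String.ofList (loop_init s.toList)
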